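-- pv_equiv track=rewrite | github.com/saipraveen333/Coding-Samples | k_equal_subsets.py | k_equal_subsets1
-- ===== SOURCE A (Python) =====
-- def k_equal_subsets1(arr,k):
--     div_sum = sum(arr) // k
--     r = []
--     def k_equal_subsets(arr, div_sum, l):
--         if sum(l) == div_sum:
--             r.append(l.copy())
--             return
--         elif sum(l) > div_sum:
--             return
--         for i in range(len(arr)):
--             l.append(arr[i])
--             k_equal_subsets(arr[i+1:], div_sum, l)
--             l.pop()
--     k_equal_subsets(arr, div_sum, [])
--     return r
-- ===== SOURCE B (Python) =====
-- def k_equal_subsets1(arr, k):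
--     # Include/exclude recursion over an index with a running sum (no slicing, no sum(l) rescans).
--     target = sum(arr) // k
--     n = len(arr)
--     res = []
--     def rec(i, cur, s):
--         if s == target:
--             res.append(cur[:])
--             return
--         if s > target:
--             return
--         if i == n:
--             return
--         rec(i + 1, cur + [arr[i]], s + arr[i])
--         rec(i + 1, cur, s)
--     rec(0, [], 0)
--     return res
-- ===== Notes on version B (the rewrite author's own statement) =====
-- stated objective: alternative
-- what changed: Replaces the for-loop-over-suffixes backtracking (slicing arr[i+1:] and rescanning sum(l) each call) with a binary include/exclude recursion over an index carrying a running sum.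
import Mathlib
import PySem

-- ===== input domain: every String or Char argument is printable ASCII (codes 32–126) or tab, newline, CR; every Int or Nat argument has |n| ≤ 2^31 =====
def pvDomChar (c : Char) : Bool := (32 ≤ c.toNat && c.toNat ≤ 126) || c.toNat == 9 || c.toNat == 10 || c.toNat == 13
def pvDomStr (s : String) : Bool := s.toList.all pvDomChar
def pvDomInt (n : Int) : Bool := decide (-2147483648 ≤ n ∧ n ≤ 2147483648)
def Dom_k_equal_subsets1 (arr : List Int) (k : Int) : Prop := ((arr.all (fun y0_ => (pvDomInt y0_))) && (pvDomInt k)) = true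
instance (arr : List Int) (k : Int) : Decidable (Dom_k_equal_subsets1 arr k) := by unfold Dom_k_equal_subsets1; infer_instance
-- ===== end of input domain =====

-- B replaces A's for-loop-over-suffixes backtracking (slicing + rescanning sum(l)) by a binary
-- include/exclude recursion over an index with a running sum; same return value on all k ≠ 0.

-- ===== PORT A =====
-- A's inner recursion: r.append becomes returning the produced results in order; the for-loop over
-- i in range(len(arr)) with arr[i] / arr[i+1:] is the structural loop kesALoop over the suffixes.
mutual
def kesA (arr : List Int) (d : Int) (l : List Int) : List (List Int) :=
  if l.sum = d then [l]
  else if l.sum > d then []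
  else kesALoop arr d l
termination_by (arr.length, 1)
def kesALoop (arr : List Int) (d : Int) (l : List Int) : List (List Int) :=
  match arr with
  | [] => []
  | a :: rest => kesA rest d (l ++ [a]) ++ kesALoop rest d l
termination_by (arr.length, 0)
end

def k_equal_subsets1 (arr : List Int) (k : Int) : List (List Int) :=
  kesA arr (PySem.Int.floordiv arr.sum k) []

-- ===== PORT B =====
-- B's rec(i, cur, s): the index i is represented by the remaining suffix arr.drop i.
def kesB (rest : List Int) (t : Int) (cur : List Int) (s : Int) : List (List Int) :=
  if s = t then [cur]
  else if s > t then []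
  else
    match rest with
    | [] => []
    | a :: rest' => kesB rest' t (cur ++ [a]) (s + a) ++ kesB rest' t cur s

def k_equal_subsets1_alt (arr : List Int) (k : Int) : List (List Int) :=
  kesB arr (PySem.Int.floordiv arr.sum k) [] 0

-- ===== PRECONDITION & SPEC =====
-- Python's '//' raises ZeroDivisionError for k = 0 (in both A and B); everything else is admitted.
def Pre_k_equal_subsets1 (arr : List Int) (k : Int) : Prop := k ≠ 0
instance (arr : List Int) (k : Int) : Decidable (Pre_k_equal_subsets1 arr k) := by unfold Pre_k_equal_subsets1; infer_instance
def pvWitness_k_equal_subsets1 : List Int × Int := ([1, 2, 3], 3)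

def Spec_k_equal_subsets1 (arr : List Int) (k : Int) (out : List (List Int)) : Prop := out = k_equal_subsets1_alt arr k
instance (arr : List Int) (k : Int) (out : List (List Int)) : Decidable (Spec_k_equal_subsets1 arr k out) := by unfold Spec_k_equal_subsets1; infer_instance

-- ===== CLAIM (what is proved, stated in full; the proofs are below) =====
def Claim_equal_k_equal_subsets1 : Prop := ∀ (arr : List Int) (k : Int), Dom_k_equal_subsets1 arr k → Pre_k_equal_subsets1 arr k → Spec_k_equal_subsets1 arr k (k_equal_subsets1 arr k)

-- ===== LEMMAS AND PROOFS =====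

-- In the 'else' branch (sum(l) ≠ d, sum(l) ≤ d) B's call re-checks and falls through to the same
-- two-way split A's loop produces; this is the mutual invariant, proved by induction on the suffix.
theorem kesALoop_eq_kesB (arr : List Int) (d : Int) (l : List Int)
    (h1 : l.sum ≠ d) (h2 : ¬ l.sum > d) : kesALoop arr d l = kesB arr d l l.sum := by
  induction arr generalizing l with
  | nil =>
    rw [kesALoop, kesB.eq_def]
    simp [h1, h2]
  | cons a rest ih =>
    have hs : (l ++ [a]).sum = l.sum + a := by simp
    have hA : kesA rest d (l ++ [a]) = kesB rest d (l ++ [a]) (l.sum + a) := by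
      rw [kesA, hs]
      split_ifs with e1 e2
      · rw [kesB.eq_def]; simp [e1]
      · rw [kesB.eq_def]; simp [e1, e2]
      · have h := ih (l ++ [a]) (by rwa [hs]) (by rwa [hs])
        rwa [hs] at h
    rw [kesALoop, hA, ih l h1 h2]
    conv_rhs => rw [kesB.eq_def]
    simp [h1, h2]

theorem kesA_eq_kesB (arr : List Int) (d : Int) (l : List Int) :
    kesA arr d l = kesB arr d l l.sum := by
  rw [kesA]
  split_ifs with e1 e2
  · rw [kesB.eq_def]; simp [e1]
  · rw [kesB.eq_def]; simp [e1, e2]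
  · exact kesALoop_eq_kesB arr d l e1 e2

-- ===== VERDICT (by name: the statement is the Claim_ definition above) =====
theorem k_equal_subsets1_spec : Claim_equal_k_equal_subsets1 := by
  intro arr k _ _
  unfold Spec_k_equal_subsets1 k_equal_subsets1 k_equal_subsets1_alt
  simpa using kesA_eq_kesB arr (PySem.Int.floordiv arr.sum k) []
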